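-- pv_equiv track=rewrite | github.com/pypi-data/pypi-mirror-397 | packages/dtu-hpc-cli/dtu_hpc_cli-1.4.1.tar.gz/dtu_hpc_cli-1.4.1/dtu_hpc_cli/history.py | filter_by_comparable
-- ===== SOURCE A (Python) =====
-- def filter_by_comparable(
--     history: list[dict],
--     key: str,
--     above: int | None,
--     below: int | None,
--     equals: int | None,
-- ) -> list[dict]:
--     if above is not None:
--         history = [
--             entry for entry in history if entry["config"].get(key) is not None and entry["config"].get(key) > above
--         ]
--     if below is not None:
--         history = [
--             entry for entry in history if entry["config"].get(key) is not None and entry["config"].get(key) < below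
--         ]
--     if equals is not None:
--         history = [
--             entry for entry in history if entry["config"].get(key) is not None and entry["config"].get(key) == equals
--         ]
--     return history
-- ===== SOURCE B (Python) =====
-- def filter_by_comparable(
--     history: list[dict],
--     key: str,
--     above: int | None,
--     below: int | None,
--     equals: int | None,
-- ) -> list[dict]:
--     if above is None and below is None and equals is None:
--         return history
--
--     def keep(entry):
--         val = entry["config"].get(key)
--         if val is None:
--             return False
--         return (
--             (above is None or val > above)
--             and (below is None or val < below)
--             and (equals is None or val == equals)
--         )
--
--     return [entry for entry in history if keep(entry)]
-- ===== Notes on version B (the rewrite author's own statement) =====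
-- stated objective: simpler
-- what changed: Replaces A's three sequential filtering comprehensions (one list rebuild per active bound) with a single pass that fetches the config value once per entry and tests all active bounds in one combined predicate, with a trivial fast path when no bound is given.
import Mathlib
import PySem

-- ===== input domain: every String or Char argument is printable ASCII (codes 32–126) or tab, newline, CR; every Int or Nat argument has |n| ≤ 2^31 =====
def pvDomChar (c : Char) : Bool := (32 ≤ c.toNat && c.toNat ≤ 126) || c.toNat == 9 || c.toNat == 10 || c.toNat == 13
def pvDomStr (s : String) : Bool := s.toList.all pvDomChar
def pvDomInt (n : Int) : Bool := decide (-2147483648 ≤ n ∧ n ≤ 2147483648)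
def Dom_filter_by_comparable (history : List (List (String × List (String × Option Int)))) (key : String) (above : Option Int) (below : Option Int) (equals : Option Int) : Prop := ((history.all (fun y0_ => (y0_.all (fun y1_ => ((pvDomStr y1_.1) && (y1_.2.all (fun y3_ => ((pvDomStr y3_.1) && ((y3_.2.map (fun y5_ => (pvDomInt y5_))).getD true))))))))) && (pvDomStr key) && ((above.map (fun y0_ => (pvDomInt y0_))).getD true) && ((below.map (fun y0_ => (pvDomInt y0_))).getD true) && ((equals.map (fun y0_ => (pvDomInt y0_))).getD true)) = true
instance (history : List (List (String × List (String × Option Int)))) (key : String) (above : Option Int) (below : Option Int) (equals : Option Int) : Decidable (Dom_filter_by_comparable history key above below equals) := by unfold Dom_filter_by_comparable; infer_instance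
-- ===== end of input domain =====

-- ===== PORT A =====
-- B collapses A's three sequential filter passes into one combined-predicate pass; objective: simpler.
-- entry["config"].get(key): KeyError when "config" is absent (none here, excluded by Pre_);
-- .get flattens a stored None value and a missing key to None, hence the .bind id.
def pvCfgGet (entry : List (String × List (String × Option Int))) (key : String) :
    Option (Option Int) :=
  (entry.lookup "config").map (fun cfg => (cfg.lookup key).bind id)

def filter_by_comparable (history : List (List (String × List (String × Option Int)))) (key : String) (above : Option Int) (below : Option Int) (equals : Option Int) : List (List (String × List (String × Option Int))) :=
  let h1 := match above with
    | none => history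
    | some a => history.filter (fun entry =>
        match pvCfgGet entry key with
        | some (some v) => decide (v > a)
        | _ => false)
  let h2 := match below with
    | none => h1
    | some b => h1.filter (fun entry =>
        match pvCfgGet entry key with
        | some (some v) => decide (v < b)
        | _ => false)
  let h3 := match equals with
    | none => h2
    | some q => h2.filter (fun entry =>
        match pvCfgGet entry key with
        | some (some v) => decide (v = q)
        | _ => false)
  h3

-- ===== PORT B =====
-- val = entry["config"].get(key), flattening a stored None; faithful whenever "config"
-- exists (guaranteed by Pre_ on every input B's filter actually runs on).
def pvConfigVal (key : String) (entry : List (String × List (String × Option Int))) : Option Int :=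
  (((entry.lookup "config").getD []).lookup key).join

def pvKeep (key : String) (above below equals : Option Int)
    (entry : List (String × List (String × Option Int))) : Bool :=
  match pvConfigVal key entry with
  | some v =>
      (match above with | none => true | some a => decide (v > a)) &&
      (match below with | none => true | some b => decide (v < b)) &&
      (match equals with | none => true | some q => decide (v = q))
  | none => false

def filter_by_comparable_alt (history : List (List (String × List (String × Option Int)))) (key : String) (above : Option Int) (below : Option Int) (equals : Option Int) : List (List (String × List (String × Option Int))) :=
  if above = none && below = none && equals = none then history
  else history.filter (pvKeep key above below equals)

-- ===== PRECONDITION & SPEC =====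
-- Pre_ excludes exactly the inputs on which Python A raises KeyError: some bound is active
-- and some entry has no "config" key (A's first active pass scans every entry).
def Pre_filter_by_comparable (history : List (List (String × List (String × Option Int)))) (key : String) (above : Option Int) (below : Option Int) (equals : Option Int) : Prop :=
  (above = none ∧ below = none ∧ equals = none) ∨
  ∀ entry ∈ history, (entry.lookup "config").isSome

instance (history : List (List (String × List (String × Option Int)))) (key : String) (above : Option Int) (below : Option Int) (equals : Option Int) : Decidable (Pre_filter_by_comparable history key above below equals) := by unfold Pre_filter_by_comparable; infer_instance

def pvWitness_filter_by_comparable : (List (List (String × List (String × Option Int)))) × String × Option Int × Option Int × Option Int :=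
  ([[("config", [("x", some 3), ("y", none)])], [("config", [])]], "x", some 1, some 5, none)

def Spec_filter_by_comparable (history : List (List (String × List (String × Option Int)))) (key : String) (above : Option Int) (below : Option Int) (equals : Option Int) (out : List (List (String × List (String × Option Int)))) : Prop := out = filter_by_comparable_alt history key above below equals
instance (history : List (List (String × List (String × Option Int)))) (key : String) (above : Option Int) (below : Option Int) (equals : Option Int) (out : List (List (String × List (String × Option Int)))) : Decidable (Spec_filter_by_comparable history key above below equals out) := by unfold Spec_filter_by_comparable; infer_instance

-- ===== CLAIM (what is proved, stated in full; the proofs are below) =====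
def Claim_equal_filter_by_comparable : Prop := ∀ (history : List (List (String × List (String × Option Int)))) (key : String) (above : Option Int) (below : Option Int) (equals : Option Int), Dom_filter_by_comparable history key above below equals → Pre_filter_by_comparable history key above below equals → Spec_filter_by_comparable history key above below equals (filter_by_comparable history key above below equals)

-- ===== LEMMAS AND PROOFS =====
-- The two ports agree on ALL inputs (both map a missing "config" key to a dropped entry
-- whenever some bound is active); Pre_ is needed only because Python A raises there.
theorem pvConfigVal_eq_join (key : String) (e : List (String × List (String × Option Int))) :
    pvConfigVal key e = (pvCfgGet e key).join := by
  unfold pvConfigVal pvCfgGet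
  cases e.lookup "config" with
  | none => rfl
  | some cfg => cases cfg.lookup key <;> rfl

theorem ports_agree (history : List (List (String × List (String × Option Int)))) (key : String) (above below equals : Option Int) :
    filter_by_comparable history key above below equals =
    filter_by_comparable_alt history key above below equals := by
  cases above <;> cases below <;> cases equals <;>
    simp only [filter_by_comparable, filter_by_comparable_alt, List.filter_filter] <;>
    simp only [decide_true, decide_false, Bool.and_self, Bool.and_true, Bool.and_false,
      Option.some_ne_none, reduceIte, reduceCtorEq] <;>
  first
  | rfl
  | (refine (List.filter_congr ?_).symm
     intro e _
     rcases h : pvCfgGet e key with _ | (_ | v) <;>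
       simp [pvKeep, pvConfigVal_eq_join, h, Bool.and_comm])

-- ===== VERDICT (by name: the statement is the Claim_ definition above) =====
theorem filter_by_comparable_spec : Claim_equal_filter_by_comparable := by
  intro history key above below equals _ _
  unfold Spec_filter_by_comparable
  exact ports_agree history key above below equals
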